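-- pv_equiv track=rewrite | github.com/worobec/Yahtzee | yahtzee final fall 2014.py | maxStraightFound
-- ===== SOURCE A (Python) =====
-- def maxStraightFound(listName):
--     #this function returns the length of the longest straight found
--     listName.sort()
--     listLength = len(listName)
--     maxLength = 1
--     curLength = 1
--     for counter in range (1, listLength):
--         if listName[counter - 1] + 1 == listName[counter]: #value at position counter 1 larger predessor
--             curLength = curLength + 1
--         else:
--             if listName[counter - 1] + 1 < listName[counter]:
--                 #jump of 2 or more, start new straignt
--                 curLength = 1
--         if curLength > maxLength :
--             maxLength = curLength
--     return maxLength
-- ===== SOURCE B (Python) =====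
-- def maxStraightFound(listName):
--     # Different algorithm: hash-set "longest consecutive sequence" walk.
--     # Only run starts (v with v-1 not in the set) are expanded, each run is
--     # counted by walking v, v+1, ... through the set; no scan of the sorted list.
--     listName.sort()  # kept solely to preserve A's in-place mutation; unused below
--     vals = set(listName)
--     best = 1
--     for v in vals:
--         if v - 1 not in vals:
--             length = 1
--             while v + length in vals:
--                 length += 1
--             if length > best:
--                 best = length
--     return best
-- ===== Notes on version B (the rewrite author's own statement) =====
-- stated objective: alternative
-- what changed: Replaces A's scan of the sorted list with the hash-set longest-consecutive-sequence algorithm: build a set, detect run starts via 'v-1 not in set', and walk each run upward through the set; listName.sort() is kept only for A's in-place mutation side effect and the result no longer depends on any ordering.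
import Mathlib
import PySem

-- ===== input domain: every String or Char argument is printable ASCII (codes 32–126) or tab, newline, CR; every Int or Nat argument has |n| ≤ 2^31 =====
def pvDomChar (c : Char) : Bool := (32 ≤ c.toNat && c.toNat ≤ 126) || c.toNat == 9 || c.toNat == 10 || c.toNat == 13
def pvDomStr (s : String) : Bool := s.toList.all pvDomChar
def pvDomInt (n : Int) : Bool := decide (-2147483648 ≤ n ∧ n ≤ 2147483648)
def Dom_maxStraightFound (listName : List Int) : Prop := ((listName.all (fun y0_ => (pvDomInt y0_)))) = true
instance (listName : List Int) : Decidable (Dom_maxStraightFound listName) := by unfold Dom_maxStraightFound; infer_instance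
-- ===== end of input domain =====

-- B replaces A's scan of the sorted list by the hash-set longest-consecutive-sequence
-- walk (run starts found via 'v-1 not in set', runs counted by walking upward through
-- the set); objective: alternative. Equivalence is about the RETURN value; both A and B
-- sort the argument in place in Python (B keeps the sort only for that side effect).

-- ===== PORT A =====
-- one iteration of A's 'for counter in range(1, listLength)' body, state = (maxLength, curLength)
def pvAStep (s : List Int) (st : Int × Int) (counter : Int) : Int × Int :=
  let curLength :=
    if PySem.List.pyGetD s (counter - 1) 0 + 1 = PySem.List.pyGetD s counter 0 then st.2 + 1
    else if PySem.List.pyGetD s (counter - 1) 0 + 1 < PySem.List.pyGetD s counter 0 then 1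
    else st.2
  (if curLength > st.1 then curLength else st.1, curLength)

def maxStraightFound (listName : List Int) : Int :=
  let s := PySem.List.sorted listName (fun x => x) false   -- listName.sort()
  let listLength := PySem.List.len s
  ((PySem.List.pyRange 1 listLength 1).foldl (pvAStep s) (1, 1)).1

-- ===== PORT B =====
-- B's inner 'while v + length in vals: length += 1'; the fuel len(vals) is a pure
-- totality guard (the walk visits distinct set members, so it never runs out)
def pvRunLen (vals : List Int) (v : Int) : Nat → Int → Int
  | 0, len => len
  | fuel + 1, len => if (v + len) ∈ vals then pvRunLen vals v fuel (len + 1) else len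

def maxStraightFound_alt (listName : List Int) : Int :=
  let _s := PySem.List.sorted listName (fun x => x) false  -- listName.sort(); side effect only
  let vals := PySem.Set.ofList listName                    -- vals = set(listName)
  vals.foldl (fun best v =>
    if (v - 1) ∈ vals then best
    else
      let length := pvRunLen vals v vals.length 1
      if length > best then length else best) 1

-- ===== PRECONDITION & SPEC =====
def Spec_maxStraightFound (listName : List Int) (out : Int) : Prop := out = maxStraightFound_alt listName
instance (listName : List Int) (out : Int) : Decidable (Spec_maxStraightFound listName out) := by unfold Spec_maxStraightFound; infer_instance

-- ===== CLAIM (what is proved, stated in full; the proofs are below) =====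
def Claim_equal_maxStraightFound : Prop := ∀ (listName : List Int), Dom_maxStraightFound listName → Spec_maxStraightFound listName (maxStraightFound listName)

-- ===== LEMMAS AND PROOFS =====

-- ---- A-side reduction: the index loop over the sorted list = a pairwise scan over its dedup ----

def pvBStep (st : Int × Int) (p : Int × Int) : Int × Int :=
  let cur := if p.2 = p.1 + 1 then st.2 + 1 else 1
  (max st.1 cur, cur)

-- adjacent dedup of a sorted list (proof-only helper)
def pvDD : List Int → List Int
  | [] => []
  | [a] => [a]
  | a :: b :: t => if a = b then pvDD (b :: t) else a :: pvDD (b :: t)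

lemma pvDD_head (t : List Int) (b : Int) : ∃ r, pvDD (b :: t) = b :: r := by
  induction t generalizing b with
  | nil => exact ⟨[], rfl⟩
  | cons c t' ih =>
    by_cases h : b = c
    · obtain ⟨r, hr⟩ := ih c
      exact ⟨r, by simp [pvDD, h, hr]⟩
    · exact ⟨pvDD (c :: t'), by simp [pvDD, h]⟩

lemma pvDD_mem (s : List Int) (x : Int) : x ∈ pvDD s ↔ x ∈ s := by
  induction s with
  | nil => simp [pvDD]
  | cons a t ih =>
    cases t with
    | nil => simp [pvDD]
    | cons b t' =>
      by_cases h : a = b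
      · simp only [pvDD, if_pos h]
        rw [ih]
        subst h
        simp only [List.mem_cons]
        tauto
      · simp only [pvDD, if_neg h, List.mem_cons]
        rw [ih]
        simp

lemma pvDD_pairwise_lt (s : List Int) (hs : s.Pairwise (· ≤ ·)) : (pvDD s).Pairwise (· < ·) := by
  induction s with
  | nil => simp [pvDD]
  | cons a t ih =>
    cases t with
    | nil => simp [pvDD]
    | cons b t' =>
      have hs' : (b :: t').Pairwise (· ≤ ·) := hs.tail
      by_cases h : a = b
      · simpa [pvDD, h] using ih hs'
      · have hab : a < b := lt_of_le_of_ne (List.rel_of_pairwise_cons hs (by simp)) h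
        simp only [pvDD, if_neg h]
        refine List.Pairwise.cons ?_ (ih hs')
        intro y hy
        have hy' : y ∈ b :: t' := (pvDD_mem _ y).mp hy
        rcases List.mem_cons.mp hy' with rfl | hy''
        · exact hab
        · exact lt_of_lt_of_le hab (List.rel_of_pairwise_cons hs' hy'')

-- the dedup of the sorted list is a permutation of set(xs)
lemma pvDD_perm_set (xs : List Int) :
    (pvDD (PySem.List.sorted xs (fun x => x) false)).Perm (PySem.Set.ofList xs) := by
  set s := PySem.List.sorted xs (fun x => x) false with hs
  have hsorted : s.Pairwise (· ≤ ·) := PySem.List.sorted_pairwise xs (fun x => x)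
  have hlt : (pvDD s).Pairwise (· < ·) := pvDD_pairwise_lt s hsorted
  have hnd : (pvDD s).Nodup := hlt.imp (fun h => ne_of_lt h)
  refine (List.perm_ext_iff_of_nodup hnd (PySem.Set.nodup_ofList xs)).mpr ?_
  intro y
  rw [pvDD_mem, PySem.Set.mem_ofList, hs, PySem.List.mem_sorted]

-- A's index loop is the fold of pvAStep over adjacent pairs of s
lemma pv_pairs_eq (s : List Int) :
    (PySem.List.pyRange 1 (PySem.List.len s) 1).map
        (fun j => (PySem.List.pyGetD s (j - 1) 0, PySem.List.pyGetD s j 0))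
      = s.zip s.tail := by
  apply List.ext_getElem
  · cases s with
    | nil => simp [PySem.List.pyRange_one_eq_nil, PySem.List.len]
    | cons a t =>
      simp [PySem.List.length_pyRange_one, PySem.List.len]
  · intro k h1 h2
    simp only [List.getElem_map, PySem.List.getElem_pyRange_one]
    have hk : k < s.length - 1 := by
      simpa [PySem.List.length_pyRange_one, PySem.List.len] using h1
    have e1 : (1 : Int) + (k : Int) - 1 = ((k : Nat) : Int) := by ring
    have e2 : (1 : Int) + (k : Int) = (((k + 1 : Nat)) : Int) := by push_cast; ring
    rw [e1, e2, PySem.List.pyGetD_natCast, PySem.List.pyGetD_natCast, List.getElem_zip]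
    have hk1 : k < s.length := by omega
    have hk2 : k + 1 < s.length := by omega
    rw [List.getD_eq_getElem s 0 hk1, List.getD_eq_getElem s 0 hk2]
    congr 1
    rw [List.getElem_tail]

lemma pv_if_max (m c : Int) : (if c > m then c else m) = max m c := by
  rw [max_def]; split_ifs <;> omega

-- the core A-side step: A's pairwise fold over a sorted list equals the fold over its dedup
lemma pv_scan_eq (s : List Int) (hs : s.Pairwise (· ≤ ·)) (st : Int × Int) (hst : st.2 ≤ st.1) :
    (s.zip s.tail).foldl
        (fun st p =>
          let curLength := if p.1 + 1 = p.2 then st.2 + 1 else if p.1 + 1 < p.2 then 1 else st.2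
          (if curLength > st.1 then curLength else st.1, curLength)) st
      = ((pvDD s).zip (pvDD s).tail).foldl pvBStep st := by
  cases s with
  | nil => simp [pvDD]
  | cons a t =>
    induction t generalizing a st with
    | nil => simp [pvDD]
    | cons b t' ih =>
      have hs' : (b :: t').Pairwise (· ≤ ·) := hs.tail
      by_cases h : a = b
      · subst h
        have h1 : ¬(a + 1 = a) := by omega
        have h2 : ¬(a + 1 < a) := by omega
        have h3 : ¬(st.2 > st.1) := by omega
        simp only [List.tail_cons, List.zip_cons_cons, List.foldl_cons, pvDD,
          if_neg h1, if_neg h2, if_neg h3, Prod.mk.eta]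
        exact ih st hst a hs'
      · have hab : a < b := lt_of_le_of_ne (List.rel_of_pairwise_cons hs (by simp)) h
        obtain ⟨r, hr⟩ := pvDD_head t' b
        have hcur :
            (if a + 1 = b then st.2 + 1 else if a + 1 < b then 1 else st.2)
              = (if b = a + 1 then st.2 + 1 else 1) := by
          split_ifs <;> omega
        have hstep :
            (let curLength := if a + 1 = b then st.2 + 1 else if a + 1 < b then 1 else st.2
             (if curLength > st.1 then curLength else st.1, curLength)) = pvBStep st (a, b) := by
          simp only [pvBStep, hcur, pv_if_max]
        simp only [List.tail_cons, List.zip_cons_cons, List.foldl_cons, pvDD, if_neg h, hr]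
        rw [hstep]
        have hinv : (pvBStep st (a, b)).2 ≤ (pvBStep st (a, b)).1 := by
          simp [pvBStep]
        have := ih (pvBStep st (a, b)) hinv b hs'
        simpa [pvDD, hr] using this

-- ---- the pairwise scan as a structural recursion ----

def pvScanGo (b c prev : Int) : List Int → Int
  | [] => b
  | w :: t => pvScanGo (max b (if w = prev + 1 then c + 1 else 1)) (if w = prev + 1 then c + 1 else 1) w t

def pvScan : List Int → Int
  | [] => 1
  | v :: t => pvScanGo 1 1 v t

lemma pv_scan_zip : ∀ (t : List Int) (v b c : Int),
    (((v :: t).zip t).foldl pvBStep (b, c)).1 = pvScanGo b c v t := by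
  intro t
  induction t with
  | nil => intro v b c; rfl
  | cons w t' ih =>
    intro v b c
    simp only [List.zip_cons_cons, List.foldl_cons, pvScanGo, pvBStep]
    exact ih w _ _

-- ---- B-side abstraction: the set walk as a max-fold over per-element contributions ----

def pvContrib (S : List Int) (f : Nat) (v : Int) : Int :=
  if (v - 1) ∈ S then 1 else pvRunLen S v f 1

def pvMFold (S : List Int) (f : Nat) : Int → List Int → Int
  | b, [] => b
  | b, v :: t => pvMFold S f (max b (pvContrib S f v)) t

lemma pv_alt_fold (S : List Int) : ∀ (l : List Int) (b : Int), 1 ≤ b →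
    l.foldl (fun best v =>
      if (v - 1) ∈ S then best
      else
        let length := pvRunLen S v S.length 1
        if length > best then length else best) b = pvMFold S S.length b l := by
  intro l
  induction l with
  | nil => intro b _; rfl
  | cons v t ih =>
    intro b hb
    simp only [List.foldl_cons, pvMFold]
    have hstep :
        (if (v - 1) ∈ S then b
         else
           let length := pvRunLen S v S.length 1
           if length > b then length else b) = max b (pvContrib S S.length v) := by
      unfold pvContrib
      by_cases h : (v - 1) ∈ S
      · rw [if_pos h, if_pos h]
        exact (max_eq_left hb).symm
      · rw [if_neg h, if_neg h, pv_if_max]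
    rw [hstep]
    exact ih _ (le_trans hb (le_max_left _ _))

lemma pvRunLen_spec (S : List Int) (v : Int) : ∀ (fuel : Nat) (m : Nat) (len : Int),
    (∀ i : Nat, i < m → v + len + (i : Int) ∈ S) → (v + len + (m : Int)) ∉ S → m ≤ fuel →
    pvRunLen S v fuel len = len + m := by
  intro fuel
  induction fuel with
  | zero =>
    intro m len _ _ hle
    interval_cases m
    simp [pvRunLen]
  | succ fuel ih =>
    intro m len hmem hstop hle
    cases m with
    | zero =>
      have h0 : (v + len) ∉ S := by simpa using hstop
      simp [pvRunLen, h0]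
    | succ k =>
      have h0 : (v + len) ∈ S := by
        have := hmem 0 (by omega)
        simpa using this
      simp only [pvRunLen, if_pos h0]
      have hmem' : ∀ i : Nat, i < k → v + (len + 1) + (i : Int) ∈ S := by
        intro i hi
        have h := hmem (i + 1) (by omega)
        have e : v + len + ((i + 1 : Nat) : Int) = v + (len + 1) + (i : Int) := by push_cast; ring
        rwa [e] at h
      have hstop' : v + (len + 1) + (k : Int) ∉ S := by
        have e : v + len + ((k + 1 : Nat) : Int) = v + (len + 1) + (k : Int) := by push_cast; ring
        rwa [e] at hstop
      rw [ih k (len + 1) hmem' hstop' (by omega)]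
      push_cast
      ring

lemma pvRunLen_mem_congr (S T : List Int) (h : ∀ x : Int, x ∈ S ↔ x ∈ T) (v : Int) :
    ∀ (fuel : Nat) (len : Int), pvRunLen S v fuel len = pvRunLen T v fuel len := by
  intro fuel
  induction fuel with
  | zero => intro len; rfl
  | succ fuel ih =>
    intro len
    simp only [pvRunLen, h (v + len)]
    by_cases hm : (v + len) ∈ T
    · simp [hm, ih]
    · simp [hm]

lemma pvContrib_congr (S T : List Int) (f g : Nat) (h : ∀ x : Int, x ∈ S ↔ x ∈ T)
    (hf : f = g) (v : Int) : pvContrib S f v = pvContrib T g v := by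
  unfold pvContrib
  rw [hf]
  by_cases hm : (v - 1) ∈ S
  · rw [if_pos hm, if_pos ((h _).mp hm)]
  · rw [if_neg hm, if_neg (fun hc => hm ((h _).mpr hc)), pvRunLen_mem_congr S T h]

lemma pvMFold_congr (S T : List Int) (f g : Nat) :
    ∀ (l : List Int) (b : Int), (∀ x ∈ l, pvContrib S f x = pvContrib T g x) →
    pvMFold S f b l = pvMFold T g b l := by
  intro l
  induction l with
  | nil => intro b _; rfl
  | cons v t ih =>
    intro b h
    simp only [pvMFold]
    rw [h v (by simp)]
    exact ih _ (fun x hx => h x (by simp [hx]))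

lemma pvMFold_perm (S : List Int) (f : Nat) {l l' : List Int} (h : l.Perm l') :
    ∀ b : Int, pvMFold S f b l = pvMFold S f b l' := by
  induction h with
  | nil => intro b; rfl
  | cons x _ ih =>
    intro b
    simp only [pvMFold]
    exact ih _
  | swap x y l =>
    intro b
    simp only [pvMFold]
    rw [max_right_comm]
  | trans _ _ ih1 ih2 =>
    intro b
    rw [ih1 b, ih2 b]

lemma pvMFold_max (S : List Int) (f : Nat) :
    ∀ (l : List Int) (x y : Int), pvMFold S f (max x y) l = max x (pvMFold S f y l) := by
  intro l
  induction l with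
  | nil => intro x y; rfl
  | cons v t ih =>
    intro x y
    simp only [pvMFold]
    rw [max_assoc, ih]

lemma pvMFold_ones (S : List Int) (f : Nat) :
    ∀ (l : List Int) (b : Int), 1 ≤ b → (∀ x ∈ l, pvContrib S f x = 1) →
    pvMFold S f b l = b := by
  intro l
  induction l with
  | nil => intro b _ _; rfl
  | cons v t ih =>
    intro b hb h
    simp only [pvMFold]
    rw [h v (by simp), max_eq_left hb]
    exact ih b hb (fun x hx => h x (by simp [hx]))

lemma pvMFold_append (S : List Int) (f : Nat) :
    ∀ (l1 l2 : List Int) (b : Int), pvMFold S f b (l1 ++ l2) = pvMFold S f (pvMFold S f b l1) l2 := by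
  intro l1
  induction l1 with
  | nil => intro l2 b; rfl
  | cons v t ih =>
    intro l2 b
    simp only [List.cons_append, pvMFold]
    exact ih l2 _

-- ---- the pigeonhole stop: walking up from any value leaves a finite nodup list ----

lemma pv_exists_stop (S : List Int) (v : Int) :
    ∃ m : Nat, (∀ i : Nat, i < m → v + 1 + (i : Int) ∈ S) ∧ (v + 1 + (m : Int)) ∉ S ∧ m ≤ S.length := by
  have hchain : ∀ m : Nat, (∀ i : Nat, i < m → v + 1 + (i : Int) ∈ S) → m ≤ S.length := by
    intro m hmem
    have hnd : ((List.range m).map (fun j : Nat => v + 1 + (j : Int))).Nodup := by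
      refine List.Nodup.map ?_ (List.nodup_range)
      intro a b hab
      simp only [] at hab
      omega
    have hsub : ((List.range m).map (fun j : Nat => v + 1 + (j : Int))) ⊆ S := by
      intro x hx
      simp only [List.mem_map, List.mem_range] at hx
      obtain ⟨j, hj, rfl⟩ := hx
      exact hmem j hj
    have := (List.subperm_of_subset hnd hsub).length_le
    simpa using this
  have hex : ∃ j : Nat, (v + 1 + (j : Int)) ∉ S := by
    by_contra hall
    simp only [not_exists, not_not] at hall
    have := hchain (S.length + 1) (fun i _ => hall i)
    omega
  refine ⟨Nat.find hex, ?_, Nat.find_spec hex, ?_⟩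
  · intro i hi
    exact not_not.mp (Nat.find_min hex hi)
  · exact hchain _ (fun i hi => not_not.mp (Nat.find_min hex hi))

-- ---- the leading-run length of a strictly increasing list ----

def pvRL : Int → List Int → Nat
  | _, [] => 0
  | v, w :: t => if w = v + 1 then pvRL (v + 1) t + 1 else 0

lemma pvRL_le : ∀ (t : List Int) (v : Int), pvRL v t ≤ t.length := by
  intro t
  induction t with
  | nil => intro v; simp [pvRL]
  | cons w t' ih =>
    intro v
    simp only [pvRL, List.length_cons]
    split
    · have := ih (v + 1); omega
    · omega

lemma pvRL_mem_take : ∀ (t : List Int) (v : Int) (i : Nat), i < pvRL v t →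
    v + 1 + (i : Int) ∈ t.take (pvRL v t) := by
  intro t
  induction t with
  | nil => intro v i h; simp [pvRL] at h
  | cons w t' ih =>
    intro v i h
    by_cases hw : w = v + 1
    · simp only [pvRL, if_pos hw] at h ⊢
      rw [List.take_succ_cons]
      cases i with
      | zero => simp [hw]
      | succ j =>
        refine List.mem_cons_of_mem _ ?_
        have hj := ih (v + 1) j (by omega)
        have e : v + 1 + ((j + 1 : Nat) : Int) = (v + 1) + 1 + (j : Int) := by push_cast; ring
        rw [e]
        exact hj
    · simp only [pvRL, if_neg hw] at h
      omega

lemma pvRL_take : ∀ (t : List Int) (v : Int), ∀ x ∈ t.take (pvRL v t),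
    ∃ i : Nat, i < pvRL v t ∧ x = v + 1 + (i : Int) := by
  intro t
  induction t with
  | nil => intro v x hx; simp [pvRL] at hx
  | cons w t' ih =>
    intro v x hx
    by_cases hw : w = v + 1
    · simp only [pvRL, if_pos hw, List.take_succ_cons] at hx
      rcases List.mem_cons.mp hx with rfl | hx'
      · exact ⟨0, by simp only [pvRL, if_pos hw]; omega, by simp [hw]⟩
      · obtain ⟨i, hi, rfl⟩ := ih (v + 1) x hx'
        refine ⟨i + 1, by simp only [pvRL, if_pos hw]; omega, by push_cast; ring⟩
    · simp only [pvRL, if_neg hw] at hx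
      simp at hx

lemma pvRL_drop : ∀ (t : List Int) (v : Int),
    t.drop (pvRL v t) = [] ∨
      ∃ w rest, t.drop (pvRL v t) = w :: rest ∧ w ≠ v + 1 + (pvRL v t : Int) := by
  intro t
  induction t with
  | nil => intro v; left; simp
  | cons w t' ih =>
    intro v
    by_cases hw : w = v + 1
    · simp only [pvRL, if_pos hw, List.drop_succ_cons]
      rcases ih (v + 1) with h | ⟨w', rest, hd, hne⟩
      · left; exact h
      · right
        refine ⟨w', rest, hd, ?_⟩
        intro hc
        apply hne
        rw [hc]
        push_cast
        ring
    · right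
      refine ⟨w, t', ?_, ?_⟩
      · simp only [pvRL, if_neg hw, List.drop_zero]
      · intro hc
        simp only [pvRL, if_neg hw] at hc
        exact hw (by omega)

-- ---- the scan walks a leading run in one stride ----

lemma pvScanGo_max : ∀ (t : List Int) (v c x y : Int),
    pvScanGo (max x y) c v t = max x (pvScanGo y c v t) := by
  intro t
  induction t with
  | nil => intro v c x y; rfl
  | cons w t' ih =>
    intro v c x y
    simp only [pvScanGo]
    rw [max_assoc, ih]

lemma pvScanGo_run : ∀ (t : List Int) (v b c : Int), c ≤ b →
    pvScanGo b c v t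
      = pvScanGo (max b (c + (pvRL v t : Int))) (c + (pvRL v t : Int)) (v + (pvRL v t : Int))
          (t.drop (pvRL v t)) := by
  intro t
  induction t with
  | nil =>
    intro v b c hc
    simp [pvScanGo, pvRL, max_eq_left hc]
  | cons w t' ih =>
    intro v b c hc
    by_cases hw : w = v + 1
    · simp only [pvRL, if_pos hw, List.drop_succ_cons]
      have hstep : pvScanGo b c v (w :: t') = pvScanGo (max b (c + 1)) (c + 1) w t' := by
        simp [pvScanGo, hw]
      rw [hstep, ih w (max b (c + 1)) (c + 1) (le_max_right _ _), hw]
      have hnn : (0 : Int) ≤ (pvRL (v + 1) t' : Int) := Int.natCast_nonneg _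
      have e1 : c + 1 + (pvRL (v + 1) t' : Int) = c + ((pvRL (v + 1) t' + 1 : Nat) : Int) := by
        push_cast; ring
      have e2 : v + 1 + (pvRL (v + 1) t' : Int) = v + ((pvRL (v + 1) t' + 1 : Nat) : Int) := by
        push_cast; ring
      have e3 : max (max b (c + 1)) (c + 1 + (pvRL (v + 1) t' : Int))
          = max b (c + ((pvRL (v + 1) t' + 1 : Nat) : Int)) := by
        rw [max_assoc]
        congr 1
        rw [max_eq_right (by omega)]
        push_cast; ring
      rw [e3, e1, e2]
    · simp only [pvRL, if_neg hw]
      simp [max_eq_left hc]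

-- ---- the core: on a strictly increasing list the pairwise scan equals the set walk ----

lemma pv_core : ∀ (n : Nat) (u : List Int), u.length ≤ n → u.Pairwise (· < ·) →
    pvScan u = pvMFold u u.length 1 u := by
  intro n
  induction n with
  | zero =>
    intro u hlen _
    have : u = [] := List.eq_nil_of_length_eq_zero (by omega)
    subst this
    rfl
  | succ n ih =>
    intro u hlen hpair
    cases u with
    | nil => rfl
    | cons v t =>
      obtain ⟨r, hr⟩ : ∃ r : Nat, r = pvRL v t := ⟨pvRL v t, rfl⟩
      have hsplit : t.take r ++ t.drop r = t := List.take_append_drop r t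
      have hpt : t.Pairwise (· < ·) := hpair.tail
      have hvt : ∀ x ∈ t, v < x := fun x hx => List.rel_of_pairwise_cons hpair hx
      have happ : (t.take r ++ t.drop r).Pairwise (· < ·) := by rw [hsplit]; exact hpt
      obtain ⟨hptk, hprest, hcross⟩ := List.pairwise_append.mp happ
      have hrun_mem : ∀ i : Nat, i < r → v + 1 + (i : Int) ∈ t.take r := by
        intro i hi
        have := pvRL_mem_take t v i (by rw [← hr]; exact hi)
        rwa [← hr] at this
      have hrun_bound : ∀ x ∈ t.take r, ∃ i : Nat, i < r ∧ x = v + 1 + (i : Int) := by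
        intro x hx
        have := pvRL_take t v x (by rw [← hr]; exact hx)
        rwa [← hr] at this
      have hrle : r ≤ t.length := by rw [hr]; exact pvRL_le t v
      have hrnn : (0 : Int) ≤ (r : Int) := Int.natCast_nonneg r
      have hdrop : t.drop r = [] ∨
          ∃ w rest, t.drop r = w :: rest ∧ w ≠ v + 1 + (r : Int) := by
        have := pvRL_drop t v
        rwa [← hr] at this
      have hrest_gt : ∀ w ∈ t.drop r, v + 1 + (r : Int) < w := by
        rcases hdrop with hnil | ⟨w0, rest', hd, hne⟩
        · intro w hw; rw [hnil] at hw; simp at hw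
        · intro w hw
          have hw0t : w0 ∈ t := by
            rw [← hsplit]
            exact List.mem_append_right _ (by rw [hd]; simp)
          have h1 : v < w0 := hvt w0 hw0t
          have hgt0 : v + (r : Int) < w0 := by
            rcases Nat.eq_zero_or_pos r with hr0 | hrpos
            · rw [hr0]; simpa using h1
            · have hmem : v + (r : Int) ∈ t.take r := by
                have := hrun_mem (r - 1) (by omega)
                have e : v + 1 + ((r - 1 : Nat) : Int) = v + (r : Int) := by
                  have : ((r - 1 : Nat) : Int) = (r : Int) - 1 := by omega
                  omega
                rwa [e] at this
              exact hcross _ hmem w0 (by rw [hd]; simp)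
          have hw0gt : v + 1 + (r : Int) < w0 := by
            have := hne
            omega
          rw [hd] at hw hprest
          rcases List.mem_cons.mp hw with rfl | hw'
          · exact hw0gt
          · exact lt_trans hw0gt (List.rel_of_pairwise_cons hprest hw')
      have hnotmem : (v + 1 + (r : Int)) ∉ (v :: t) := by
        intro hmem
        rcases List.mem_cons.mp hmem with heq | hmt
        · omega
        · rw [← hsplit] at hmt
          rcases List.mem_append.mp hmt with hin | hin
          · obtain ⟨i, hi, hei⟩ := hrun_bound _ hin
            have : (i : Int) < (r : Int) := by exact_mod_cast hi
            omega
          · exact absurd (hrest_gt _ hin) (by omega)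
      -- scan side
      have hscan : pvScan (v :: t) = max (1 + (r : Int)) (pvScan (t.drop r)) := by
        have h0 : pvScan (v :: t) = pvScanGo 1 1 v t := rfl
        rw [h0, pvScanGo_run t v 1 1 le_rfl, ← hr, max_eq_right (by omega)]
        rcases hdrop with hnil | ⟨w0, rest', hd, hne⟩
        · rw [hnil]
          show (1 + (r : Int)) = max (1 + (r : Int)) (pvScan [])
          rw [show pvScan [] = 1 from rfl, max_eq_left (by omega)]
        · rw [hd]
          have hcond : ¬ (w0 = (v + (r : Int)) + 1) := by
            intro h; exact hne (by omega)
          show pvScanGo (max (1 + (r : Int)) (if w0 = (v + (r : Int)) + 1 then (1 + (r : Int)) + 1 else 1)) (if w0 = (v + (r : Int)) + 1 then (1 + (r : Int)) + 1 else 1) w0 rest'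
              = max (1 + (r : Int)) (pvScan (w0 :: rest'))
          rw [if_neg hcond, pvScanGo_max rest' w0 1 (1 + (r : Int)) 1]
          rfl
      -- contribution of the head: the whole run
      have hcv : pvContrib (v :: t) (v :: t).length v = 1 + (r : Int) := by
        unfold pvContrib
        have hv1 : (v - 1) ∉ (v :: t) := by
          intro h
          rcases List.mem_cons.mp h with he | ht
          · omega
          · have := hvt _ ht; omega
        rw [if_neg hv1]
        apply pvRunLen_spec (v :: t) v _ r 1
        · intro i hi
          exact List.mem_cons_of_mem _ (by rw [← hsplit]; exact List.mem_append_left _ (hrun_mem i hi))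
        · exact hnotmem
        · simp only [List.length_cons]; omega
      -- run elements contribute 1
      have htk1 : ∀ x ∈ t.take r, pvContrib (v :: t) (v :: t).length x = 1 := by
        intro x hx
        obtain ⟨i, hi, rfl⟩ := hrun_bound x hx
        unfold pvContrib
        have hxm : (v + 1 + (i : Int) - 1) ∈ (v :: t) := by
          cases i with
          | zero =>
            have e : v + 1 + ((0 : Nat) : Int) - 1 = v := by simp
            rw [e]; simp
          | succ j =>
            have e : v + 1 + ((j + 1 : Nat) : Int) - 1 = v + 1 + (j : Int) := by push_cast; ring
            rw [e]
            exact List.mem_cons_of_mem _ (by rw [← hsplit]; exact List.mem_append_left _ (hrun_mem j (by omega)))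
        rw [if_pos hxm]
      -- rest contributions agree with rest-ambient contributions
      have hrest_nodup : (t.drop r).Nodup := hprest.imp ne_of_lt
      have hcong : ∀ x ∈ t.drop r,
          pvContrib (v :: t) (v :: t).length x = pvContrib (t.drop r) (t.drop r).length x := by
        intro w hw
        have hwgt := hrest_gt w hw
        have hmem1 : (w - 1) ∈ (v :: t) ↔ (w - 1) ∈ t.drop r := by
          constructor
          · intro h
            rcases List.mem_cons.mp h with he | ht2
            · omega
            · rw [← hsplit] at ht2
              rcases List.mem_append.mp ht2 with hin | hin
              · obtain ⟨i, hi, hei⟩ := hrun_bound _ hin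
                have : (i : Int) < (r : Int) := by exact_mod_cast hi
                omega
              · exact hin
          · intro h
            exact List.mem_cons_of_mem _ (by rw [← hsplit]; exact List.mem_append_right _ h)
        unfold pvContrib
        by_cases hb : (w - 1) ∈ t.drop r
        · rw [if_pos (hmem1.mpr hb), if_pos hb]
        · rw [if_neg (fun hc => hb (hmem1.mp hc)), if_neg hb]
          obtain ⟨m, hm1, hm2, hm3⟩ := pv_exists_stop (t.drop r) w
          have hmnn : (0 : Int) ≤ (m : Int) := Int.natCast_nonneg m
          rw [pvRunLen_spec (t.drop r) w (t.drop r).length m 1 hm1 hm2 hm3]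
          apply pvRunLen_spec (v :: t) w _ m 1
          · intro i hi
            exact List.mem_cons_of_mem _ (by rw [← hsplit]; exact List.mem_append_right _ (hm1 i hi))
          · intro hc
            rcases List.mem_cons.mp hc with he | ht2
            · omega
            · rw [← hsplit] at ht2
              rcases List.mem_append.mp ht2 with hin | hin
              · obtain ⟨i, hi, hei⟩ := hrun_bound _ hin
                have : (i : Int) < (r : Int) := by exact_mod_cast hi
                omega
              · exact hm2 hin
          · have : (t.drop r).length = t.length - r := List.length_drop
            simp only [List.length_cons]
            omega
      -- IH on the rest
      have hrlen : (t.drop r).length ≤ n := by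
        have : (t.drop r).length = t.length - r := List.length_drop
        simp only [List.length_cons] at hlen
        omega
      have hih := ih (t.drop r) hrlen hprest
      -- mfold side
      have hmf : pvMFold (v :: t) (v :: t).length 1 (v :: t)
          = max (1 + (r : Int)) (pvScan (t.drop r)) := by
        have h1 : pvMFold (v :: t) (v :: t).length 1 (v :: t)
            = pvMFold (v :: t) (v :: t).length (1 + (r : Int)) t := by
          show pvMFold (v :: t) (v :: t).length (max 1 (pvContrib (v :: t) (v :: t).length v)) t
              = pvMFold (v :: t) (v :: t).length (1 + (r : Int)) t
          rw [hcv, max_eq_right (by omega)]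
        have h2 : pvMFold (v :: t) (v :: t).length (1 + (r : Int)) t
            = pvMFold (v :: t) (v :: t).length (1 + (r : Int)) (t.take r ++ t.drop r) := by
          rw [hsplit]
        have h3 : pvMFold (v :: t) (v :: t).length (1 + (r : Int)) (t.take r ++ t.drop r)
            = pvMFold (v :: t) (v :: t).length (1 + (r : Int)) (t.drop r) := by
          rw [pvMFold_append, pvMFold_ones _ _ _ _ (by omega) htk1]
        have h4 : pvMFold (v :: t) (v :: t).length (1 + (r : Int)) (t.drop r)
            = pvMFold (t.drop r) (t.drop r).length (1 + (r : Int)) (t.drop r) :=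
          pvMFold_congr _ _ _ _ _ _ hcong
        have h5 : pvMFold (t.drop r) (t.drop r).length (1 + (r : Int)) (t.drop r)
            = max (1 + (r : Int)) (pvMFold (t.drop r) (t.drop r).length 1 (t.drop r)) := by
          have e : pvMFold (t.drop r) (t.drop r).length (1 + (r : Int)) (t.drop r)
              = pvMFold (t.drop r) (t.drop r).length (max (1 + (r : Int)) 1) (t.drop r) := by
            rw [max_eq_left (by omega)]
          rw [e, pvMFold_max]
        rw [h1, h2, h3, h4, h5, hih]
      rw [hscan, hmf]

-- ===== VERDICT (by name: the statement is the Claim_ definition above) =====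
theorem maxStraightFound_spec : Claim_equal_maxStraightFound := by
  intro listName _
  unfold Spec_maxStraightFound maxStraightFound maxStraightFound_alt
  dsimp only
  set s := PySem.List.sorted listName (fun x => x) false with hsdef
  have hsorted : s.Pairwise (· ≤ ·) := PySem.List.sorted_pairwise listName (fun x => x)
  have hfold :
      (PySem.List.pyRange 1 (PySem.List.len s) 1).foldl (pvAStep s) (1, 1)
        = (s.zip s.tail).foldl
            (fun st p =>
              let curLength := if p.1 + 1 = p.2 then st.2 + 1 else if p.1 + 1 < p.2 then 1 else st.2
              (if curLength > st.1 then curLength else st.1, curLength)) (1, 1) := by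
    rw [← pv_pairs_eq s, List.foldl_map]
    rfl
  rw [hfold, pv_scan_eq s hsorted (1, 1) (by norm_num)]
  have hlt : (pvDD s).Pairwise (· < ·) := pvDD_pairwise_lt s hsorted
  have hperm : (pvDD s).Perm (PySem.Set.ofList listName) := by
    rw [hsdef]
    exact pvDD_perm_set listName
  have hA : (((pvDD s).zip (pvDD s).tail).foldl pvBStep (1, 1)).1 = pvScan (pvDD s) := by
    cases h : pvDD s with
    | nil => rfl
    | cons v t => exact pv_scan_zip t v 1 1
  have hB : (PySem.Set.ofList listName).foldl
      (fun best v =>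
        if (v - 1) ∈ PySem.Set.ofList listName then best
        else
          let length := pvRunLen (PySem.Set.ofList listName) v (PySem.Set.ofList listName).length 1
          if length > best then length else best) 1 = pvScan (pvDD s) := by
    rw [pv_alt_fold (PySem.Set.ofList listName) (PySem.Set.ofList listName) 1 le_rfl,
      pvMFold_perm _ _ hperm.symm 1,
      pvMFold_congr (PySem.Set.ofList listName) (pvDD s) _ (pvDD s).length _ _
        (fun x _ => pvContrib_congr _ _ _ _ (fun y => hperm.mem_iff.symm) hperm.length_eq.symm x),
      ← pv_core (pvDD s).length (pvDD s) le_rfl hlt]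
  rw [hA, hB]
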